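-- pv_equiv track=rewrite | github.com/donup088/Algorithm | 프로그래머스/level3/최고의집합.py | solution
-- ===== SOURCE A (Python) =====
-- def solution(n, s):
--     answer = []
--     if s<n:
--         return [-1]
--     a=s//n
--     b=s%n
--     for _ in range(n):
--         answer.append(a)
--     for i in range(b):
--         answer[i%n]+=1
--     answer.sort()
--     return answer
-- ===== SOURCE B (Python) =====
-- def solution(n, s):
--     if s < n:
--         return [-1]
--     a, b = divmod(s, n)
--     return [a] * (n - b) + [a + 1] * b
-- ===== Notes on version B (the rewrite author's own statement) =====
-- stated objective: simpler
-- what changed: B builds the answer directly as (n-b) copies of s//n followed by b copies of s//n+1 via divmod and list repetition, replacing A's append loop, increment loop and sort.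
import Mathlib
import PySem

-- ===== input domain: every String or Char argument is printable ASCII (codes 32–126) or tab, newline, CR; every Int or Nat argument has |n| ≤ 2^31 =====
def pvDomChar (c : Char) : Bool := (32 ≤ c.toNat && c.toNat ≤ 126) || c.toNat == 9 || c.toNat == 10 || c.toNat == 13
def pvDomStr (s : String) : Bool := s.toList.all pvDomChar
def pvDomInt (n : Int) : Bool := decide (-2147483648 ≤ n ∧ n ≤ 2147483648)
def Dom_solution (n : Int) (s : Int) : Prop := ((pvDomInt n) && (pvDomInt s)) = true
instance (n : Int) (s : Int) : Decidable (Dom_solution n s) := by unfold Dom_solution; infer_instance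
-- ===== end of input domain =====

-- B builds the answer directly as (n-b) copies of s//n followed by b copies of s//n+1
-- (no increment pass, no sort) — simpler; equivalence of return values proved on Pre_solution.

-- ===== PORT A =====
def solution (n : Int) (s : Int) : List Int :=
  if s < n then [-1]
  else
    let a := PySem.Int.floordiv s n
    let b := PySem.Int.mod s n
    let answer : List Int := (PySem.List.pyRange 0 n 1).foldl (fun acc _ => acc ++ [a]) []
    let answer := (PySem.List.pyRange 0 b 1).foldl (fun acc i =>
        PySem.List.pySetD acc (PySem.Int.mod i n)
          (PySem.List.pyGetD acc (PySem.Int.mod i n) 0 + 1)) answer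
    PySem.List.sorted answer (fun x => x) false

-- ===== PORT B =====
def solution_alt (n : Int) (s : Int) : List Int :=
  if s < n then [-1]
  else
    let a := PySem.Int.floordiv s n
    let b := PySem.Int.mod s n
    List.replicate (n - b).toNat a ++ List.replicate b.toNat (a + 1)

-- ===== PRECONDITION & SPEC =====
-- A (and B) raise ZeroDivisionError exactly when n = 0 and n ≤ s; Pre_ excludes that.
def Pre_solution (n : Int) (s : Int) : Prop := ¬(n = 0 ∧ n ≤ s)
instance (n : Int) (s : Int) : Decidable (Pre_solution n s) := by unfold Pre_solution; infer_instance
def pvWitness_solution : Int × Int := (3, 7)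
def Spec_solution (n : Int) (s : Int) (out : List Int) : Prop := out = solution_alt n s
instance (n : Int) (s : Int) (out : List Int) : Decidable (Spec_solution n s out) := by unfold Spec_solution; infer_instance

-- ===== CLAIM =====
def Claim_equal_solution : Prop := ∀ (n : Int) (s : Int), Dom_solution n s → Pre_solution n s → Spec_solution n s (solution n s)

-- ===== LEMMAS AND PROOFS =====

-- the append loop builds a replicate
theorem pv_fold_app {α : Type} (l : List α) (acc : List Int) (a : Int) :
    l.foldl (fun acc _ => acc ++ [a]) acc = acc ++ List.replicate l.length a := by
  induction l generalizing acc with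
  | nil => simp
  | cons x t ih =>
    simp [List.foldl, ih, List.replicate_succ]

-- the increment loop turns the first k entries of replicate m a into a+1
theorem pv_loop (a : Int) (m : Nat) (n : Int) (hn : n = (m : Int)) (k : Nat) (hk : k ≤ m) :
    (PySem.List.pyRange 0 (k : Int) 1).foldl (fun acc i =>
        PySem.List.pySetD acc (PySem.Int.mod i n)
          (PySem.List.pyGetD acc (PySem.Int.mod i n) 0 + 1)) (List.replicate m a)
    = List.replicate k (a + 1) ++ List.replicate (m - k) a := by
  induction k with
  | zero => simp
  | succ j ih =>
    have hj : j ≤ m := Nat.le_of_succ_le hk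
    have hjm : j < m := hk
    have hr : PySem.List.pyRange 0 ((j : Int) + 1) 1
        = PySem.List.pyRange 0 (j : Int) 1 ++ [(j : Int)] :=
      PySem.List.pyRange_one_succ_right (by positivity)
    have hcast : ((j + 1 : Nat) : Int) = (j : Int) + 1 := by push_cast; ring
    rw [hcast, hr, List.foldl_append, ih hj]
    have hmod : PySem.Int.mod (j : Int) n = (j : Int) := by
      rw [PySem.Int.mod_eq_emod_of_pos (by omega)]
      exact Int.emod_eq_of_lt (by positivity) (by omega)
    have hlen : (List.replicate j (a + 1) ++ List.replicate (m - j) a).length = m := by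
      simp; omega
    simp only [List.foldl, hmod]
    have hget : PySem.List.pyGetD (List.replicate j (a + 1) ++ List.replicate (m - j) a) (j : Int) 0 = a := by
      rw [PySem.List.pyGetD_eq_getElem _ _ (by positivity) (by rw [hlen]; exact_mod_cast hjm)]
      rw [List.getElem_append_right (by simp)]
      simp
    have hset : PySem.List.pySetD (List.replicate j (a + 1) ++ List.replicate (m - j) a) (j : Int) (a + 1)
        = List.replicate (j + 1) (a + 1) ++ List.replicate (m - (j + 1)) a := by
      unfold PySem.List.pySetD PySem.List.pySet? PySem.List.pyIdx?
      rw [hlen]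
      have h1 : (0 : Int) ≤ (j : Int) := by positivity
      have h2 : (j : Int) < (m : Int) := by exact_mod_cast hjm
      simp only [if_pos h1, if_pos h2, Option.map_some, Option.getD_some, Int.toNat_natCast]
      rw [List.set_append]
      simp only [List.length_replicate, lt_irrefl, Nat.sub_self]
      have hmj : m - j = (m - j - 1) + 1 := by omega
      rw [hmj, List.replicate_succ, List.set_cons_zero, List.replicate_succ',
        List.append_assoc]
      congr 2
    rw [hget, hset]

theorem solution_eq (n s : Int) (hpre : Pre_solution n s) : solution n s = solution_alt n s := by
  unfold solution solution_alt
  by_cases hs : s < n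
  · simp [hs]
  · simp only [hs, if_false]
    set a := PySem.Int.floordiv s n with ha
    set b := PySem.Int.mod s n with hb
    by_cases hn : 0 < n
    · -- n > 0 : b ∈ [0, n)
      have hb0 : 0 ≤ b := PySem.Int.mod_nonneg s hn
      have hbn : b < n := PySem.Int.mod_lt s hn
      have h1 : (PySem.List.pyRange 0 n 1).foldl (fun acc _ => acc ++ [a]) []
          = List.replicate n.toNat a := by
        rw [pv_fold_app]
        simp
      rw [h1]
      have hrhs : List.replicate (n - b).toNat a ++ List.replicate b.toNat (a + 1)
          = List.replicate (n.toNat - b.toNat) a ++ List.replicate b.toNat (a + 1) := by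
        congr 2
        omega
      rw [hrhs]
      have hbk : b = ((b.toNat : Nat) : Int) := by omega
      rw [hbk, pv_loop a n.toNat n (by omega) b.toNat (by omega)]
      refine PySem.List.sorted_id_eq_of_perm_of_pairwise _ _ List.perm_append_comm ?_
      rw [List.pairwise_append]
      refine ⟨List.pairwise_replicate_of_refl, List.pairwise_replicate_of_refl, ?_⟩
      intro x hx y hy
      rw [List.eq_of_mem_replicate hx, List.eq_of_mem_replicate hy]
      omega
    · -- n < 0 (n ≠ 0 by Pre_): everything is empty on both sides
      have hneg : n < 0 := by
        rcases lt_trichotomy n 0 with h | h | h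
        · exact h
        · exact absurd ⟨h, by omega⟩ hpre
        · exact absurd h hn
      have hb0 : b ≤ 0 := (PySem.Int.mod_neg_bounds s hneg).2
      have hbn : n < b := (PySem.Int.mod_neg_bounds s hneg).1
      have e1 : PySem.List.pyRange 0 n 1 = [] := by
        rw [PySem.List.pyRange_one]; simp; omega
      have e2 : PySem.List.pyRange 0 b 1 = [] := by
        rw [PySem.List.pyRange_one]; simp; omega
      rw [e1, e2]
      simp only [List.foldl_nil]
      have t1 : (n - b).toNat = 0 := by omega
      have t2 : b.toNat = 0 := by omega
      rw [t1, t2]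
      simp [PySem.List.sorted]

-- ===== VERDICT =====
theorem solution_spec : Claim_equal_solution := by
  intro n s _ hpre
  exact solution_eq n s hpre
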